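-- pv_equiv track=rewrite | github.com/hankalebeda/yanbao-new | automation/agents/worker_pool.py | _scopes_overlap
-- ===== SOURCE A (Python) =====
-- def _scopes_overlap(scope_a: set, scope_b: set) -> bool:
--     """Check if two file scopes overlap."""
--     if not scope_a or not scope_b:
--         return False
--     # Direct file overlap
--     if scope_a & scope_b:
--         return True
--     # Directory prefix overlap
--     for a in scope_a:
--         a_root = a.split("**")[0].rstrip("*/")
--         for b in scope_b:
--             b_root = b.split("**")[0].rstrip("*/")
--             if not a_root or not b_root:
--                 return True
--             if a.startswith(b_root) or b.startswith(a_root):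
--                 return True
--     return False
-- ===== SOURCE B (Python) =====
-- def _scopes_overlap(scope_a: set, scope_b: set) -> bool:
--     """Check if two file scopes overlap (direct or directory-prefix)."""
--     if not scope_a or not scope_b:
--         return False
--     if not scope_a.isdisjoint(scope_b):
--         return True
--
--     def root(s):
--         return s.split("**")[0].rstrip("*/")
--
--     roots_a = {root(a) for a in scope_a}
--     roots_b = {root(b) for b in scope_b}
--     if "" in roots_a or "" in roots_b:
--         return True
--
--     def hits(strings, roots):
--         # s starts with some root r  <=>  some prefix of s is in the root set
--         return any(s[:k] in roots for s in strings for k in range(len(s) + 1))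
--
--     return hits(scope_a, roots_b) or hits(scope_b, roots_a)
-- ===== Notes on version B (the rewrite author's own statement) =====
-- stated objective: faster
-- what changed: B replaces A's nested scan over all (a,b) pairs (recomputing b's root for every a) by: one isdisjoint test for direct overlap, root sets computed once per side, and a prefix test that checks each string's prefixes against the hashed root set instead of comparing it with every element of the other side.
import Mathlib
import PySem

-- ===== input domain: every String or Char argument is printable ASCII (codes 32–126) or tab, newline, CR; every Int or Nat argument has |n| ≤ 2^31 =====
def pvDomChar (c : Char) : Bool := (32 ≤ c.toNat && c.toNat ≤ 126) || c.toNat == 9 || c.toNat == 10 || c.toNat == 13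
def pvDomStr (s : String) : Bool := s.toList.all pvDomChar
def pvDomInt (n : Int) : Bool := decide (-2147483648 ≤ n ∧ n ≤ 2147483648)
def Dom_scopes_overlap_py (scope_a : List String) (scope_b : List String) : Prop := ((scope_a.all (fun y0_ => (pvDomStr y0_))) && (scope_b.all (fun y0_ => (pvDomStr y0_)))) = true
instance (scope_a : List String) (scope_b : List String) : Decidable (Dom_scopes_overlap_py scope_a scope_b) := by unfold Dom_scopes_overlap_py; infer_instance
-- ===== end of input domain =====

-- B replaces A's nested pairwise scan by precomputed root sets plus a hashed prefix lookup per string (faster).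


-- ===== PORT A =====
-- s.split("**")[0].rstrip("*/")  (the same expression occurs verbatim in A and in B).
-- .rstrip("*/") has no PySem primitive; it is ported by hand as dropping trailing '*'/'/'
-- characters (reverse, dropWhile, reverse) — exact for any string.
def pvRoot (s : String) : List Char :=
  (((PySem.Chars.splitOn s.toList ['*', '*']).headD []).reverse.dropWhile
    (fun c => c == '*' || c == '/')).reverse

def scopes_overlap_py (scope_a : List String) (scope_b : List String) : Bool :=
  if scope_a.isEmpty || scope_b.isEmpty then false
  else if !(PySem.Set.inter (PySem.Set.ofList scope_a) (PySem.Set.ofList scope_b)).isEmpty then true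
  else
    scope_a.any (fun a =>
      let a_root := pvRoot a
      scope_b.any (fun b =>
        let b_root := pvRoot b
        a_root.isEmpty || b_root.isEmpty ||
          PySem.Chars.startswith a.toList b_root || PySem.Chars.startswith b.toList a_root))

-- ===== PORT B =====
-- any(s[:k] in roots for s in strings for k in range(len(s) + 1))
def pvHits (strings : List String) (roots : PySem.Set (List Char)) : Bool :=
  strings.any (fun s =>
    (PySem.List.pyRange 0 ((s.toList.length : Int) + 1) 1).any (fun k =>
      roots.contains (PySem.Chars.slice s.toList none (some k))))

def scopes_overlap_py_alt (scope_a : List String) (scope_b : List String) : Bool :=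
  if scope_a.isEmpty || scope_b.isEmpty then false
  else if !(PySem.Set.isdisjoint (PySem.Set.ofList scope_a) (PySem.Set.ofList scope_b)) then true
  else
    let roots_a : PySem.Set (List Char) := PySem.Set.ofList (scope_a.map pvRoot)
    let roots_b : PySem.Set (List Char) := PySem.Set.ofList (scope_b.map pvRoot)
    if roots_a.contains [] || roots_b.contains [] then true
    else pvHits scope_a roots_b || pvHits scope_b roots_a

-- ===== PRECONDITION & SPEC =====
def Spec_scopes_overlap_py (scope_a : List String) (scope_b : List String) (out : Bool) : Prop := out = scopes_overlap_py_alt scope_a scope_b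
instance (scope_a : List String) (scope_b : List String) (out : Bool) : Decidable (Spec_scopes_overlap_py scope_a scope_b out) := by unfold Spec_scopes_overlap_py; infer_instance

-- ===== CLAIM (what is proved, stated in full; the proofs are below) =====
def Claim_equal_scopes_overlap_py : Prop := ∀ (scope_a : List String) (scope_b : List String), Dom_scopes_overlap_py scope_a scope_b → Spec_scopes_overlap_py scope_a scope_b (scopes_overlap_py scope_a scope_b)

-- ===== LEMMAS AND PROOFS =====

-- "some prefix of s is in roots"  ⟺  "s starts with some element of roots"
theorem pvHits_iff (strings : List String) (roots : PySem.Set (List Char)) :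
    pvHits strings roots = true ↔
      ∃ s ∈ strings, ∃ r ∈ roots, PySem.Chars.startswith s.toList r = true := by
  unfold pvHits
  simp only [List.any_eq_true, PySem.Chars.startswith_iff]
  constructor
  · rintro ⟨s, hs, k, hk, hmem⟩
    rw [PySem.List.mem_pyRange_one] at hk
    simp only [PySem.Set.contains_iff] at hmem
    refine ⟨s, hs, _, hmem, ?_⟩
    rw [PySem.Chars.slice_eq_listSlice, PySem.List.slice_to _ hk.1]
    exact List.take_prefix _ _
  · rintro ⟨s, hs, r, hr, hpre⟩
    refine ⟨s, hs, (r.length : Int), ?_, ?_⟩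
    · rw [PySem.List.mem_pyRange_one]
      have := hpre.length_le
      omega
    · rw [PySem.Chars.slice_eq_listSlice, PySem.List.slice_to _ (by positivity)]
      simp only [Int.toNat_natCast, PySem.Set.contains_iff]
      rwa [List.prefix_iff_eq_take.mp hpre] at hr

theorem pair_decomp (a b : List String) (ha : a ≠ []) (hb : b ≠ []) :
    (a.any fun x => b.any fun y =>
      ((pvRoot x).isEmpty || (pvRoot y).isEmpty ||
        PySem.Chars.startswith x.toList (pvRoot y) || PySem.Chars.startswith y.toList (pvRoot x)))
    = (if (PySem.Set.ofList (a.map pvRoot)).contains [] || (PySem.Set.ofList (b.map pvRoot)).contains [] then true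
       else pvHits a (PySem.Set.ofList (b.map pvRoot)) || pvHits b (PySem.Set.ofList (a.map pvRoot))) := by
  obtain ⟨a0, ha0⟩ := List.exists_mem_of_ne_nil a ha
  obtain ⟨b0, hb0⟩ := List.exists_mem_of_ne_nil b hb
  by_cases hroot : ((PySem.Set.ofList (a.map pvRoot)).contains [] || (PySem.Set.ofList (b.map pvRoot)).contains []) = true
  · rw [if_pos hroot]
    simp only [Bool.or_eq_true, PySem.Set.contains_iff, PySem.Set.mem_ofList, List.mem_map] at hroot
    simp only [List.any_eq_true, Bool.or_eq_true, or_assoc, List.isEmpty_iff,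
      PySem.Chars.startswith_iff]
    rcases hroot with ⟨x, hx, hrx⟩ | ⟨y, hy, hry⟩
    · exact ⟨x, hx, b0, hb0, Or.inl hrx⟩
    · exact ⟨a0, ha0, y, hy, Or.inr (Or.inl hry)⟩
  · rw [if_neg hroot]
    simp only [Bool.or_eq_true, PySem.Set.contains_iff, PySem.Set.mem_ofList, List.mem_map] at hroot
    push_neg at hroot
    apply Bool.eq_iff_iff.mpr
    simp only [List.any_eq_true, Bool.or_eq_true, or_assoc, List.isEmpty_iff,
      PySem.Chars.startswith_iff, pvHits_iff, PySem.Set.mem_ofList, List.mem_map]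
    constructor
    · rintro ⟨x, hx, y, hy, hc | hc | hc | hc⟩
      · exact absurd hc (hroot.1 x hx)
      · exact absurd hc (hroot.2 y hy)
      · exact Or.inl ⟨x, hx, pvRoot y, ⟨y, hy, rfl⟩, hc⟩
      · exact Or.inr ⟨y, hy, pvRoot x, ⟨x, hx, rfl⟩, hc⟩
    · rintro (⟨s, hs, r, ⟨y, hy, hry⟩, hpre⟩ | ⟨s, hs, r, ⟨x, hx, hrx⟩, hpre⟩)
      · exact ⟨s, hs, y, hy, Or.inr (Or.inr (Or.inl (hry ▸ hpre)))⟩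
      · exact ⟨x, hx, s, hs, Or.inr (Or.inr (Or.inr (hrx ▸ hpre)))⟩

theorem scopes_overlap_py_eq_alt (a b : List String) :
    scopes_overlap_py a b = scopes_overlap_py_alt a b := by
  unfold scopes_overlap_py scopes_overlap_py_alt
  by_cases h1 : (a.isEmpty || b.isEmpty) = true
  · rw [if_pos h1, if_pos h1]
  · rw [if_neg h1, if_neg h1]
    have hdis : (PySem.Set.inter (PySem.Set.ofList a) (PySem.Set.ofList b)).isEmpty
        = PySem.Set.isdisjoint (PySem.Set.ofList a) (PySem.Set.ofList b) := by
      apply Bool.eq_iff_iff.mpr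
      simp only [List.isEmpty_iff, List.eq_nil_iff_forall_not_mem, PySem.Set.mem_inter,
        PySem.Set.isdisjoint_iff]
      constructor
      · intro h x hxa hxb; exact h x ⟨hxa, hxb⟩
      · rintro h x ⟨hxa, hxb⟩; exact h x hxa hxb
    rw [hdis]
    simp only [Bool.or_eq_true, List.isEmpty_iff] at h1
    push_neg at h1
    by_cases h2 : PySem.Set.isdisjoint (PySem.Set.ofList a) (PySem.Set.ofList b) = true
    · rw [h2]
      show (a.any fun x => b.any fun y =>
          ((pvRoot x).isEmpty || (pvRoot y).isEmpty ||
            PySem.Chars.startswith x.toList (pvRoot y) || PySem.Chars.startswith y.toList (pvRoot x)))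
        = (if (PySem.Set.ofList (a.map pvRoot)).contains [] || (PySem.Set.ofList (b.map pvRoot)).contains [] then true
           else pvHits a (PySem.Set.ofList (b.map pvRoot)) || pvHits b (PySem.Set.ofList (a.map pvRoot)))
      exact pair_decomp a b h1.1 h1.2
    · rw [Bool.not_eq_true] at h2
      rw [h2]
      simp

-- ===== VERDICT (by name: the statement is the Claim_ definition above) =====
theorem scopes_overlap_py_spec : Claim_equal_scopes_overlap_py := by
  intro a b _
  unfold Spec_scopes_overlap_py
  exact scopes_overlap_py_eq_alt a b
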